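-- pv_equiv track=rewrite | github.com/w4a2y4/NLP_pj2 | test1.py | ASC2
-- ===== SOURCE A (Python) =====
-- def ASC2(word):
--     lonn = len(word)
--     tem = 0
--     t1 = 0
--     t2 = lonn
--     for i in range(0,lonn):
--         if(tem==0):
--             if((word[i] >= "0") and (word[i] <= "9")):
--                 tem = 1
--                 t1 = i
--             elif((word[i] >= "A") and (word[i] <= "Z")):
--                 tem = 1
--                 t1 = i
--             elif((word[i] >= "a") and (word[i] <= "z")):
--                 tem = 1
--                 t1 = i
--         elif(tem==1):
--             if((word[i] >= "0") and (word[i] <= "9")):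
--                 tem = 1
--             elif((word[i] >= "A") and (word[i] <= "Z")):
--                 tem = 1
--             elif((word[i] >= "a") and (word[i] <= "z")):
--                 tem = 1
--             else:
--                 tem = 2
--                 t2 = i
--     if(t2==lonn):
--         return word[0:t1],word[t1:t2],""
--     else:
--         return word[0:t1],word[t1:t2],word[t2:lonn]
-- ===== SOURCE B (Python) =====
-- def ASC2(word):
--     def an(c):
--         return ("0" <= c <= "9") or ("A" <= c <= "Z") or ("a" <= c <= "z")
--     n = len(word)
--     t1 = 0
--     found = False
--     for i in range(n):
--         if an(word[i]):
--             t1 = i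
--             found = True
--             break
--     t2 = n
--     if found:
--         for j in range(t1, n):
--             if not an(word[j]):
--                 t2 = j
--                 break
--     if t2 == n:
--         return word[0:t1], word[t1:t2], ""
--     return word[0:t1], word[t1:t2], word[t2:]
-- ===== Notes on version B (the rewrite author's own statement) =====
-- stated objective: simpler
-- what changed: A's single pass driving a three-state machine (tem=0/1/2) over every character is replaced by two sequential scans with early exit: find the first alphanumeric index t1, then (only if found) the first non-alphanumeric index t2 after it; the slices are built from t1 and t2 as in A.
import Mathlib
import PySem

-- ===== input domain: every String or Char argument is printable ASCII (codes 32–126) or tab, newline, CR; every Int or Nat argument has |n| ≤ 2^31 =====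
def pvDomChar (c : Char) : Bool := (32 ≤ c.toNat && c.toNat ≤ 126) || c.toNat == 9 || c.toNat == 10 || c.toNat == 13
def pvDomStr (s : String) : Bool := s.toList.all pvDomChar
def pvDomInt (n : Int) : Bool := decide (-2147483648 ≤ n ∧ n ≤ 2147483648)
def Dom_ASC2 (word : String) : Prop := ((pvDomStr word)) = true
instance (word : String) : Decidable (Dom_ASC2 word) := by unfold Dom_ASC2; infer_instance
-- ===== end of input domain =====

-- B replaces A's one-pass three-state machine by two sequential scans (find first
-- alphanumeric index, then first non-alphanumeric index after it); objective: simpler.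


-- ===== PORT A =====
-- literal transliteration: one fold over range(0, lonn) carrying the state (tem, t1, t2)
def ASC2 (word : String) : String × String × String :=
  let lonn : Int := PySem.Str.len word
  let st : Int × Int × Int :=
    (PySem.List.pyRange 0 lonn 1).foldl (fun st i =>
      let tem := st.1
      let t1 := st.2.1
      let t2 := st.2.2
      let c := PySem.List.pyGetD word.toList i ' '
      if tem == 0 then
        if '0' ≤ c && c ≤ '9' then (1, i, t2)
        else if 'A' ≤ c && c ≤ 'Z' then (1, i, t2)
        else if 'a' ≤ c && c ≤ 'z' then (1, i, t2)
        else (tem, t1, t2)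
      else if tem == 1 then
        if '0' ≤ c && c ≤ '9' then (1, t1, t2)
        else if 'A' ≤ c && c ≤ 'Z' then (1, t1, t2)
        else if 'a' ≤ c && c ≤ 'z' then (1, t1, t2)
        else (2, t1, i)
      else (tem, t1, t2)) (0, 0, lonn)
  let t1 := st.2.1
  let t2 := st.2.2
  if t2 == lonn then
    (PySem.Str.slice word (some 0) (some t1), PySem.Str.slice word (some t1) (some t2), "")
  else
    (PySem.Str.slice word (some 0) (some t1), PySem.Str.slice word (some t1) (some t2),
     PySem.Str.slice word (some t2) (some lonn))

-- ===== PORT B =====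
-- B's helper an(c)
def pvAn (c : Char) : Bool :=
  ('0' ≤ c && c ≤ '9') || ('A' ≤ c && c ≤ 'Z') || ('a' ≤ c && c ≤ 'z')

-- B's first loop: index of the first alphanumeric character (none = not found)
def pvFindAlnum : List Char → Int → Option Int
  | [], _ => none
  | c :: cs, i => if pvAn c then some i else pvFindAlnum cs (i + 1)

-- B's second loop: first index ≥ j at which the scanned suffix stops being alphanumeric
def pvScanEnd : List Char → Int → Int
  | [], j => j
  | c :: cs, j => if pvAn c then pvScanEnd cs (j + 1) else j

def ASC2_alt (word : String) : String × String × String :=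
  let cs := word.toList
  let n : Int := PySem.Str.len word
  let ft : Int × Bool :=
    match pvFindAlnum cs 0 with
    | some i => (i, true)
    | none => (0, false)
  let t1 := ft.1
  let t2 : Int := if ft.2 then pvScanEnd (PySem.List.slice cs (some t1) none) t1 else n
  if t2 == n then
    (PySem.Str.slice word (some 0) (some t1), PySem.Str.slice word (some t1) (some t2), "")
  else
    (PySem.Str.slice word (some 0) (some t1), PySem.Str.slice word (some t1) (some t2),
     PySem.Str.slice word (some t2) none)

-- ===== PRECONDITION & SPEC =====
def Spec_ASC2 (word : String) (out : String × String × String) : Prop := out = ASC2_alt word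
instance (word : String) (out : String × String × String) : Decidable (Spec_ASC2 word out) := by
  unfold Spec_ASC2; infer_instance

-- ===== CLAIM (what is proved, stated in full; the proofs are below) =====
def Claim_equal_ASC2 : Prop := ∀ (word : String), Dom_ASC2 word → Spec_ASC2 word (ASC2 word)

-- ===== LEMMAS AND PROOFS =====

-- A's loop body, as a function of the state and the (index, character) pair
def pvStep : Int × Int × Int → Int × Char → Int × Int × Int
  | (tem, t1, t2), (i, c) =>
    if tem == 0 then (if pvAn c then (1, i, t2) else (tem, t1, t2))
    else if tem == 1 then (if pvAn c then (1, t1, t2) else (2, t1, i))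
    else (tem, t1, t2)

theorem pvBodyA_eq (cs : List Char) :
    (fun (st : Int × Int × Int) (i : Int) =>
      let tem := st.1
      let t1 := st.2.1
      let t2 := st.2.2
      let c := PySem.List.pyGetD cs i ' '
      if tem == 0 then
        if '0' ≤ c && c ≤ '9' then (1, i, t2)
        else if 'A' ≤ c && c ≤ 'Z' then (1, i, t2)
        else if 'a' ≤ c && c ≤ 'z' then (1, i, t2)
        else (tem, t1, t2)
      else if tem == 1 then
        if '0' ≤ c && c ≤ '9' then (1, t1, t2)
        else if 'A' ≤ c && c ≤ 'Z' then (1, t1, t2)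
        else if 'a' ≤ c && c ≤ 'z' then (1, t1, t2)
        else (2, t1, i)
      else (tem, t1, t2))
    = (fun st i => pvStep st (i, PySem.List.pyGetD cs i ' ')) := by
  funext st i
  obtain ⟨tem, t1, t2⟩ := st
  simp only [pvStep, pvAn]
  by_cases h1 : ('0' ≤ PySem.List.pyGetD cs i ' ' && PySem.List.pyGetD cs i ' ' ≤ '9') = true <;>
    by_cases h2 : ('A' ≤ PySem.List.pyGetD cs i ' ' && PySem.List.pyGetD cs i ' ' ≤ 'Z') = true <;>
      by_cases h3 : ('a' ≤ PySem.List.pyGetD cs i ' ' && PySem.List.pyGetD cs i ' ' ≤ 'z') = true <;>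
        simp [h1, h2, h3]

theorem pvStep_two (t1 t2 : Int) (p : Int × Char) : pvStep (2, t1, t2) p = (2, t1, t2) := by
  obtain ⟨i, c⟩ := p
  simp [pvStep]

theorem pvFold_two (l : List Char) (j t1 t2 : Int) :
    (PySem.List.enumerate l j).foldl pvStep (2, t1, t2) = (2, t1, t2) := by
  induction l generalizing j with
  | nil => simp [PySem.List.enumerate]
  | cons c cs ih => rw [PySem.List.enumerate_cons]; simp [List.foldl_cons, pvStep_two, ih]

theorem pvFold_one (l : List Char) (j t1 t2 : Int) :
    (PySem.List.enumerate l j).foldl pvStep (1, t1, t2) =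
      if l.all pvAn then (1, t1, t2) else (2, t1, pvScanEnd l j) := by
  induction l generalizing j with
  | nil => simp [PySem.List.enumerate]
  | cons c cs ih =>
    rw [PySem.List.enumerate_cons]
    by_cases hc : pvAn c = true
    · simp [List.foldl_cons, pvStep, hc, ih, pvScanEnd]
    · simp [List.foldl_cons, pvStep, hc, pvFold_two, pvScanEnd]

theorem pvFindAlnum_bounds (cs : List Char) (s i : Int) (h : pvFindAlnum cs s = some i) :
    s ≤ i ∧ i - s < cs.length := by
  induction cs generalizing s with
  | nil => simp [pvFindAlnum] at h
  | cons c cs ih =>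
    by_cases hc : pvAn c = true
    · simp [pvFindAlnum, hc] at h
      subst h
      simp only [List.length_cons]
      constructor <;> omega
    · simp [pvFindAlnum, hc] at h
      have := ih (s + 1) h
      constructor
      · omega
      · simp [List.length_cons]; omega

theorem pvFold_zero (cs : List Char) (s t1 t2 : Int) :
    (PySem.List.enumerate cs s).foldl pvStep (0, t1, t2) =
      match pvFindAlnum cs s with
      | none => (0, t1, t2)
      | some i => (PySem.List.enumerate (cs.drop (i - s).toNat) i).foldl pvStep (1, i, t2) := by
  induction cs generalizing s with
  | nil => simp [pvFindAlnum, PySem.List.enumerate]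
  | cons c cs ih =>
    rw [PySem.List.enumerate_cons]
    by_cases hc : pvAn c = true
    · simp [List.foldl_cons, pvStep, hc, pvFindAlnum]
    · have h1 : pvFindAlnum (c :: cs) s = pvFindAlnum cs (s + 1) := by simp [pvFindAlnum, hc]
      rw [List.foldl_cons]
      have hstep : pvStep (0, t1, t2) (s, c) = (0, t1, t2) := by simp [pvStep, hc]
      rw [hstep, ih (s + 1), h1]
      cases hfa : pvFindAlnum cs (s + 1) with
      | none => simp
      | some i =>
        have hb := pvFindAlnum_bounds cs (s + 1) i hfa
        have hdrop : (c :: cs).drop (i - s).toNat = cs.drop (i - (s + 1)).toNat := by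
          have : (i - s).toNat = (i - (s + 1)).toNat + 1 := by omega
          simp [this]
        simp [hdrop]

theorem pvScanEnd_all (l : List Char) (j : Int) (h : l.all pvAn) :
    pvScanEnd l j = j + l.length := by
  induction l generalizing j with
  | nil => simp [pvScanEnd]
  | cons c cs ih =>
    rw [List.all_cons, Bool.and_eq_true] at h
    rw [List.length_cons]
    simp only [pvScanEnd, h.1, if_true, ih (j + 1) h.2]
    push_cast
    omega

theorem pvScanEnd_bounds (l : List Char) (j : Int) :
    j ≤ pvScanEnd l j ∧ pvScanEnd l j ≤ j + l.length := by
  induction l generalizing j with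
  | nil => simp [pvScanEnd]
  | cons c cs ih =>
    rw [List.length_cons]
    by_cases hc : pvAn c = true
    · have := ih (j + 1)
      simp only [pvScanEnd, hc, if_true]
      push_cast at this ⊢
      omega
    · simp only [pvScanEnd, hc, if_false, Bool.false_eq_true]
      push_cast
      omega

-- ===== VERDICT (by name: the statement is the Claim_ definition above) =====
theorem pvFoldA_enum (word : String) (init : Int × Int × Int) :
    (PySem.List.pyRange 0 (PySem.Str.len word) 1).foldl
      (fun st i => pvStep st (i, PySem.List.pyGetD word.toList i ' ')) init
    = (PySem.List.enumerate word.toList 0).foldl pvStep init := by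
  have hl : PySem.Str.len word = PySem.List.len word.toList := by
    simp [PySem.Str.len]
  rw [hl, PySem.List.enumerate_eq_map_pyRange word.toList ' ', List.foldl_map]

theorem ASC2_spec : Claim_equal_ASC2 := by
  intro word _
  show ASC2 word = ASC2_alt word
  simp only [ASC2, ASC2_alt]
  rw [pvBodyA_eq word.toList, pvFoldA_enum word, pvFold_zero]
  cases h : pvFindAlnum word.toList 0 with
  | none => simp
  | some i =>
    have hb := pvFindAlnum_bounds word.toList 0 i h
    simp only [sub_zero]
    rw [pvFold_one]
    have hslice : PySem.List.slice word.toList (some i) none = word.toList.drop i.toNat :=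
      PySem.List.slice_from word.toList hb.1
    rw [hslice]
    by_cases hall : (word.toList.drop i.toNat).all pvAn = true
    · rw [if_pos hall]
      have hlen : PySem.Str.len word = (word.toList.length : Int) := by simp [PySem.Str.len]
      have hend : pvScanEnd (word.toList.drop i.toNat) i = PySem.Str.len word := by
        rw [pvScanEnd_all _ _ hall, List.length_drop, hlen]
        omega
      simp [hend]
    · rw [if_neg hall]
      have h02 : (0:Int) ≤ pvScanEnd (word.toList.drop i.toNat) i :=
        le_trans hb.1 (pvScanEnd_bounds _ i).1
      have hs3 : PySem.Str.slice word (some (pvScanEnd (word.toList.drop i.toNat) i))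
            (some (PySem.Str.len word))
          = PySem.Str.slice word (some (pvScanEnd (word.toList.drop i.toNat) i)) none := by
        unfold PySem.Str.slice
        congr 1
        rw [PySem.Chars.slice_eq_listSlice, PySem.Chars.slice_eq_listSlice,
          PySem.List.slice_from _ h02,
          PySem.List.slice_toNat _ h02 (by simp [PySem.Str.len])]
        apply List.take_of_length_le
        simp [PySem.Str.len, List.length_drop]
      simp only [if_true, hs3]
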